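-- pv_equiv track=rewrite | github.com/ShuvalovAnthony/ege | 8/3074.py | check
-- ===== SOURCE A (Python) =====
-- def check(word):
--     if word[-1] == 'G' or word[0] == 'G': return False
--     for i in ('GG', 'OO', 'LL'):
--         if i in word: return False
--
--     for i in range(1, len(word) - 1):
--         if word[i] == 'G':
--             srez = word[i - 1: i + 2]
--             if (srez != 'OGL') and (srez != 'LGO'):
--                 return False
--
--     return True
-- ===== SOURCE B (Python) =====
-- def check(word):
--     if word[0] == 'G' or word[-1] == 'G':
--         return False
--     for i in range(1, len(word)):
--         c = word[i]
--         if c == word[i - 1] and c in 'GOL':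
--             return False
--         if c == 'G' and i + 1 < len(word):
--             prev, nxt = word[i - 1], word[i + 1]
--             if not ((prev == 'O' and nxt == 'L') or (prev == 'L' and nxt == 'O')):
--                 return False
--     return True
-- ===== Notes on version B (the rewrite author's own statement) =====
-- stated objective: alternative
-- what changed: Replaces A's three separate whole-word doubled-letter substring scans plus its separate interior-G loop with a single pass over adjacent positions that checks doubled G/O/L letters and G-neighbourhoods at once.
import Mathlib
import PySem

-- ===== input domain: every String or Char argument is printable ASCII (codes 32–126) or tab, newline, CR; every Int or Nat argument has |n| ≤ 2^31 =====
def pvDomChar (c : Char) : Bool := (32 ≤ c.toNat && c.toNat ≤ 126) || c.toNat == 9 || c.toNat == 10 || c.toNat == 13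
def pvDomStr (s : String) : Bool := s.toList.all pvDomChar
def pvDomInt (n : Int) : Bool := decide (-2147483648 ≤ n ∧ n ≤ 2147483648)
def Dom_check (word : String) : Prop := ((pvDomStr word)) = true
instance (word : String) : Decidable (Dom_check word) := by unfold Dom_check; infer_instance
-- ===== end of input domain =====

-- B merges A's three substring scans and its interior-G loop into one pass over adjacent
-- positions (objective: alternative decomposition, same asymptotic cost).
-- Pre_ excludes only the empty string, on which both Pythons raise IndexError.

-- ===== PORT A =====
-- literal port of A on the character list: guard, three substring scans, interior-G loop
def checkCore (w : List Char) : Bool :=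
  if PySem.List.pyGetD w (-1) ' ' == 'G' || PySem.List.pyGetD w 0 ' ' == 'G' then false
  else if ([['G','G'],['O','O'],['L','L']] : List (List Char)).any
      (fun s => PySem.Chars.isIn s w) then false
  else
    (PySem.List.pyRange 1 ((w.length : Int) - 1) 1).all (fun i =>
      if PySem.List.pyGetD w i ' ' == 'G' then
        let srez := PySem.List.slice w (some (i - 1)) (some (i + 2))
        srez == ['O','G','L'] || srez == ['L','G','O']
      else true)

def check (word : String) : Bool := checkCore word.toList

-- ===== PORT B =====
-- literal port of B: one guard, then a single pass checking doubles and G-contexts together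
def checkAltCore (w : List Char) : Bool :=
  if PySem.List.pyGetD w 0 ' ' == 'G' || PySem.List.pyGetD w (-1) ' ' == 'G' then false
  else
    (PySem.List.pyRange 1 (w.length : Int) 1).all (fun i =>
      let c := PySem.List.pyGetD w i ' '
      if c == PySem.List.pyGetD w (i - 1) ' ' && (c == 'G' || c == 'O' || c == 'L') then
        false
      else if c == 'G' && decide (i + 1 < (w.length : Int)) then
        let prev := PySem.List.pyGetD w (i - 1) ' '
        let nxt := PySem.List.pyGetD w (i + 1) ' '
        (prev == 'O' && nxt == 'L') || (prev == 'L' && nxt == 'O')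
      else true)

def check_alt (word : String) : Bool := checkAltCore word.toList

-- ===== PRECONDITION & SPEC =====
-- Pre_ excludes only the empty string: there word[-1] (A) and word[0] (B) raise IndexError.
def Pre_check (word : String) : Prop := word ≠ ""
instance (word : String) : Decidable (Pre_check word) := by unfold Pre_check; infer_instance
def pvWitness_check : String := "OGL"

def Spec_check (word : String) (out : Bool) : Prop := out = check_alt word
instance (word : String) (out : Bool) : Decidable (Spec_check word out) := by unfold Spec_check; infer_instance

-- ===== CLAIM (what is proved, stated in full; the proofs are below) =====
def Claim_equal_check : Prop := ∀ (word : String), Dom_check word → Pre_check word → Spec_check word (check word)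

-- ===== LEMMAS AND PROOFS =====
lemma pair_infix_iff (a b : Char) (w : List Char) :
    [a, b] <:+: w ↔ ∃ j : Nat, ∃ h : j + 1 < w.length, w[j] = a ∧ w[j + 1] = b := by
  constructor
  · rintro ⟨s, t, rfl⟩
    refine ⟨s.length, by simp, ?_, ?_⟩
    · simp
    · simp
  · rintro ⟨j, h, ha, hb⟩
    refine ⟨w.take j, w.drop (j + 2), ?_⟩
    have h1 : w.drop j = a :: b :: w.drop (j + 2) := by
      rw [List.drop_eq_getElem_cons (by omega : j < w.length),
          List.drop_eq_getElem_cons (by omega : j + 1 < w.length)]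
      simp [ha, hb]
    calc w.take j ++ [a, b] ++ w.drop (j + 2)
        = w.take j ++ w.drop j := by rw [h1]; simp
      _ = w := List.take_append_drop _ _

lemma all_pyRange_iff (m : Int) (f : Int → Bool) :
    ((PySem.List.pyRange 1 m 1).all f) = true ↔
      ∀ j : Nat, 1 ≤ j → (j : Int) < m → f j = true := by
  rw [List.all_eq_true]
  constructor
  · intro h j h1 h2
    exact h _ (by rw [PySem.List.mem_pyRange_one]; omega)
  · intro h i hi
    rw [PySem.List.mem_pyRange_one] at hi
    have : i = ((i.toNat : Nat) : Int) := by omega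
    rw [this]
    exact h i.toNat (by omega) (by omega)

lemma slice_triple (w : List Char) (j : Nat) (h1 : 1 ≤ j) (h2 : j + 1 < w.length) :
    PySem.List.slice w (some ((j : Int) - 1)) (some ((j : Int) + 2))
      = [w[j - 1], w[j], w[j + 1]] := by
  have e1 : (j : Int) - 1 = ((j - 1 : Nat) : Int) := by omega
  have e2 : (j : Int) + 2 = ((j + 2 : Nat) : Int) := by omega
  rw [e1, e2, PySem.List.slice_natCast]
  have h3 : j + 2 - (j - 1) = 3 := by omega
  rw [h3]
  have d1 : w.drop (j - 1) = w[j - 1] :: w.drop j := by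
    have e : j - 1 + 1 = j := by omega
    rw [List.drop_eq_getElem_cons (by omega : j - 1 < w.length), e]
  have d2 : w.drop j = w[j] :: w.drop (j + 1) := List.drop_eq_getElem_cons (by omega)
  have d3 : w.drop (j + 1) = w[j + 1] :: w.drop (j + 2) := List.drop_eq_getElem_cons h2
  rw [d1, d2, d3]
  rfl

-- total indexing helper (opaque to simp's getD-normalisation)
def gd (w : List Char) (j : Nat) : Char := w[j]?.getD ' '

lemma gd_eq_getElem (w : List Char) (j : Nat) (h : j < w.length) : gd w j = w[j] := by
  simp [gd, List.getElem?_eq_getElem h]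

lemma pyGetD_nat (w : List Char) (j : Nat) :
    PySem.List.pyGetD w (j : Int) ' ' = gd w j := by
  simp [gd, List.getD_eq_getElem?_getD]

def HasDbl (w : List Char) : Prop :=
  ∃ j : Nat, j + 1 < w.length ∧ gd w j = gd w (j + 1) ∧
    (gd w j = 'G' ∨ gd w j = 'O' ∨ gd w j = 'L')

def GoodG (w : List Char) : Prop :=
  ∀ j : Nat, 1 ≤ j → j + 1 < w.length → gd w j = 'G' →
    (gd w (j - 1) = 'O' ∧ gd w (j + 1) = 'L') ∨
    (gd w (j - 1) = 'L' ∧ gd w (j + 1) = 'O')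

lemma pair_infix_iff' (a b : Char) (w : List Char) :
    [a, b] <:+: w ↔ ∃ j : Nat, j + 1 < w.length ∧ gd w j = a ∧ gd w (j + 1) = b := by
  rw [pair_infix_iff]
  constructor
  · rintro ⟨j, h, ha, hb⟩
    exact ⟨j, h, by rw [gd_eq_getElem _ _ (by omega)]; exact ha,
      by rw [gd_eq_getElem _ _ h]; exact hb⟩
  · rintro ⟨j, h, ha, hb⟩
    refine ⟨j, h, ?_, ?_⟩
    · rw [gd_eq_getElem _ _ (by omega)] at ha; exact ha
    · rw [gd_eq_getElem _ _ h] at hb; exact hb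

lemma dbl_iff (w : List Char) :
    (([['G','G'],['O','O'],['L','L']] : List (List Char)).any
      (fun s => PySem.Chars.isIn s w)) = true ↔ HasDbl w := by
  simp only [List.any_cons, List.any_nil, Bool.or_eq_true, Bool.or_false,
    PySem.Chars.isIn_iff_infix]
  rw [pair_infix_iff', pair_infix_iff', pair_infix_iff']
  constructor
  · rintro (⟨j, h, ha, hb⟩ | ⟨j, h, ha, hb⟩ | ⟨j, h, ha, hb⟩)
    · exact ⟨j, h, ha.trans hb.symm, Or.inl ha⟩
    · exact ⟨j, h, ha.trans hb.symm, Or.inr (Or.inl ha)⟩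
    · exact ⟨j, h, ha.trans hb.symm, Or.inr (Or.inr ha)⟩
  · rintro ⟨j, h, heq, (hc | hc | hc)⟩
    · exact Or.inl ⟨j, h, hc, heq ▸ hc⟩
    · exact Or.inr (Or.inl ⟨j, h, hc, heq ▸ hc⟩)
    · exact Or.inr (Or.inr ⟨j, h, hc, heq ▸ hc⟩)

lemma slice_triple' (w : List Char) (j : Nat) (h1 : 1 ≤ j) (h2 : j + 1 < w.length) :
    PySem.List.slice w (some ((j : Int) - 1)) (some ((j : Int) + 2))
      = [gd w (j - 1), gd w j, gd w (j + 1)] := by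
  rw [slice_triple w j h1 h2, gd_eq_getElem _ _ (by omega : j - 1 < w.length),
    gd_eq_getElem _ _ (by omega : j < w.length), gd_eq_getElem _ _ h2]

lemma loopA_iff (w : List Char) :
    ((PySem.List.pyRange 1 ((w.length : Int) - 1) 1).all (fun i =>
      if PySem.List.pyGetD w i ' ' == 'G' then
        let srez := PySem.List.slice w (some (i - 1)) (some (i + 2))
        srez == ['O','G','L'] || srez == ['L','G','O']
      else true)) = true ↔ GoodG w := by
  rw [all_pyRange_iff]
  have key : ∀ j : Nat, 1 ≤ j → j + 1 < w.length →
      ((if PySem.List.pyGetD w (j : Int) ' ' == 'G' then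
        (PySem.List.slice w (some ((j : Int) - 1)) (some ((j : Int) + 2)) == ['O','G','L']
          || PySem.List.slice w (some ((j : Int) - 1)) (some ((j : Int) + 2)) == ['L','G','O'])
      else true) = true ↔
      (gd w j = 'G' →
        (gd w (j - 1) = 'O' ∧ gd w (j + 1) = 'L') ∨
        (gd w (j - 1) = 'L' ∧ gd w (j + 1) = 'O'))) := by
    intro j h1 h2
    rw [slice_triple' w j h1 h2, pyGetD_nat]
    by_cases hG : gd w j = 'G' <;> simp [hG]
  constructor
  · intro h j h1 h2
    exact (key j h1 h2).mp (h j h1 (by omega))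
  · intro h j h1 h2
    exact (key j h1 (by omega)).mpr (h j h1 (by omega))

lemma loopB_iff (w : List Char) :
    ((PySem.List.pyRange 1 (w.length : Int) 1).all (fun i =>
      let c := PySem.List.pyGetD w i ' '
      if c == PySem.List.pyGetD w (i - 1) ' ' && (c == 'G' || c == 'O' || c == 'L') then
        false
      else if c == 'G' && decide (i + 1 < (w.length : Int)) then
        let prev := PySem.List.pyGetD w (i - 1) ' '
        let nxt := PySem.List.pyGetD w (i + 1) ' '
        (prev == 'O' && nxt == 'L') || (prev == 'L' && nxt == 'O')
      else true)) = true ↔ (¬ HasDbl w ∧ GoodG w) := by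
  rw [all_pyRange_iff]
  have key : ∀ j : Nat, 1 ≤ j → j < w.length →
      ((let c := PySem.List.pyGetD w (j : Int) ' '
        if c == PySem.List.pyGetD w ((j : Int) - 1) ' ' && (c == 'G' || c == 'O' || c == 'L') then
          false
        else if c == 'G' && decide ((j : Int) + 1 < (w.length : Int)) then
          let prev := PySem.List.pyGetD w ((j : Int) - 1) ' '
          let nxt := PySem.List.pyGetD w ((j : Int) + 1) ' '
          (prev == 'O' && nxt == 'L') || (prev == 'L' && nxt == 'O')
        else true) = true ↔
      (¬ (gd w j = gd w (j - 1) ∧ (gd w j = 'G' ∨ gd w j = 'O' ∨ gd w j = 'L')) ∧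
        (gd w j = 'G' → j + 1 < w.length →
          (gd w (j - 1) = 'O' ∧ gd w (j + 1) = 'L') ∨
          (gd w (j - 1) = 'L' ∧ gd w (j + 1) = 'O')))) := by
    intro j h1 h2
    have e1 : (j : Int) - 1 = ((j - 1 : Nat) : Int) := by omega
    have e2 : (j : Int) + 1 = ((j + 1 : Nat) : Int) := by omega
    simp only [e1, e2, pyGetD_nat, Nat.cast_lt]
    by_cases hd1 : gd w j = gd w (j - 1) <;>
      by_cases hG : gd w j = 'G' <;>
      by_cases hO : gd w j = 'O' <;>
      by_cases hL : gd w j = 'L' <;>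
      by_cases hlt : j + 1 < w.length <;>
      simp_all
  constructor
  · intro h
    constructor
    · rintro ⟨k, hk, heq, hc⟩
      have hb := (key (k + 1) (by omega) (by omega)).mp (h (k + 1) (by omega) (by omega))
      have ek : k + 1 - 1 = k := by omega
      rw [ek] at hb
      exact hb.1 ⟨heq.symm, by rw [← heq]; exact hc⟩
    · intro j h1 h2 hG
      exact ((key j h1 (by omega)).mp (h j h1 (by omega))).2 hG h2
  · rintro ⟨hnd, hg⟩ j h1 h2
    refine (key j h1 (by omega)).mpr ⟨?_, fun hG hlt => hg j h1 hlt hG⟩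
    rintro ⟨heq, hc⟩
    have ek : j - 1 + 1 = j := by omega
    refine hnd ⟨j - 1, by omega, ?_, ?_⟩
    · rw [ek]; exact heq.symm
    · rw [← heq]; exact hc

lemma core_eq (w : List Char) : checkCore w = checkAltCore w := by
  unfold checkCore checkAltCore
  by_cases h0 : PySem.List.pyGetD w 0 ' ' = 'G'
  · simp [h0]
  by_cases h1 : PySem.List.pyGetD w (-1) ' ' = 'G'
  · simp [h1]
  rw [show (PySem.List.pyGetD w (-1) ' ' == 'G' || PySem.List.pyGetD w 0 ' ' == 'G') = false
      from by simp [h0, h1],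
    show (PySem.List.pyGetD w 0 ' ' == 'G' || PySem.List.pyGetD w (-1) ' ' == 'G') = false
      from by simp [h0, h1]]
  simp only [Bool.false_eq_true, if_false]
  by_cases hD : HasDbl w
  · rw [show (([['G','G'],['O','O'],['L','L']] : List (List Char)).any
        (fun s => PySem.Chars.isIn s w)) = true from (dbl_iff w).mpr hD]
    rw [if_pos rfl]
    symm
    rw [Bool.eq_false_iff]
    intro h
    exact ((loopB_iff w).mp h).1 hD
  · have hdf : (([['G','G'],['O','O'],['L','L']] : List (List Char)).any
        (fun s => PySem.Chars.isIn s w)) = false := by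
      rw [Bool.eq_false_iff]
      intro h
      exact hD ((dbl_iff w).mp h)
    rw [hdf]
    simp only [Bool.false_eq_true, if_false]
    rw [Bool.eq_iff_iff, loopA_iff, loopB_iff]
    exact ⟨fun hg => ⟨hD, hg⟩, fun h => h.2⟩

-- ===== VERDICT (by name: the statement is the Claim_ definition above) =====
theorem check_spec : Claim_equal_check := by
  intro word _ _
  unfold Spec_check check check_alt
  exact core_eq word.toList
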